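-- pv_equiv track=rewrite | github.com/HLW168/LintCode | 1796 · K-Difference.py | KDifference
-- ===== SOURCE A (Python) =====
-- def KDifference(nums, target):
--     # write your code here
--     count = 0
--     s = set()
--     for num in nums:
--         if (num - target) in s:
--             count += 1
--         if (num + target) in s:
--             count += 1
--
--         s.add(num)
--     return count
-- ===== SOURCE B (Python) =====
-- def KDifference(nums, target):
--     # group-by-value aggregation: build value -> list of occurrence indices,
--     # then for each distinct value pair at distance target count late occurrences
--     occ = {}
--     for j, num in enumerate(nums):
--         occ[num] = occ.get(num, []) + [j]
--     count = 0
--     for v, idxs in occ.items():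
--         for d in (target, -target):
--             w = v - d
--             if w in occ:
--                 f = occ[w][0]
--                 for j in idxs:
--                     if j > f:
--                         count += 1
--     return count
-- ===== Notes on version B (the rewrite author's own statement) =====
-- stated objective: alternative
-- what changed: Replaces A's streaming scan with a growing seen-set by a group-by-value aggregation: build a dict from each value to its full list of occurrence indices, then for each distinct value and each offset in (target, -target) count that value's occurrences lying after the partner value's first occurrence.
import Mathlib
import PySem

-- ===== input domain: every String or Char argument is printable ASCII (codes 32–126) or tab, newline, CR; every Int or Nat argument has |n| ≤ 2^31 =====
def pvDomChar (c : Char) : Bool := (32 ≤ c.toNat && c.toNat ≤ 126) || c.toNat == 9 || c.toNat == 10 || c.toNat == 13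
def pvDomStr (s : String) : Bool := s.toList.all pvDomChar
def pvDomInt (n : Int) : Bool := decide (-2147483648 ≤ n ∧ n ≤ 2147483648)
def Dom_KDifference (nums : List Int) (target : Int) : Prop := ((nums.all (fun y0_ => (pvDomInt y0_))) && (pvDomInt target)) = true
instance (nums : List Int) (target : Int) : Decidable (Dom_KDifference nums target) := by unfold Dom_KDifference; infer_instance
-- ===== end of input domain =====

-- B replaces A's streaming seen-set scan by a group-by-value aggregation: a dict from each value
-- to all its occurrence indices, then per distinct value pair at distance target it counts the
-- occurrences after the partner's first occurrence (objective: alternative algorithm, same result).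

-- ===== PORT A =====
-- single pass; state = (count, set of values seen so far)
def KDifference (nums : List Int) (target : Int) : Int :=
  (nums.foldl
    (fun (st : Int × PySem.Set Int) num =>
      let c1 := if PySem.Set.contains st.2 (num - target) then st.1 + 1 else st.1
      let c2 := if PySem.Set.contains st.2 (num + target) then c1 + 1 else c1
      (c2, PySem.Set.add st.2 num))
    (0, PySem.Set.empty)).1

-- ===== PORT B =====
-- Source B's first loop: dict value ↦ list of its occurrence indices ('occ[num] = occ.get(num, []) + [j]')
def occDictB (nums : List Int) : PySem.Dict Int (List Int) :=
  (PySem.List.enumerate nums).foldl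
    (fun d p => d.modify p.2 [] (fun l => l ++ [p.1]))
    PySem.Dict.empty

def KDifference_alt (nums : List Int) (target : Int) : Int :=
  let occ := occDictB nums
  occ.items.foldl
    (fun count p =>
      [target, -target].foldl
        (fun count d =>
          let w := p.1 - d
          if occ.contains w then
            -- occ[w][0]: whenever w is a key its index list is nonempty, so pyGetD is exact here
            let f := PySem.List.pyGetD (occ.getD w []) 0 0
            p.2.foldl (fun count j => if f < j then count + 1 else count) count
          else count)
        count)
    0

-- ===== PRECONDITION & SPEC =====
def Spec_KDifference (nums : List Int) (target : Int) (out : Int) : Prop := out = KDifference_alt nums target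
instance (nums : List Int) (target : Int) (out : Int) : Decidable (Spec_KDifference nums target out) := by unfold Spec_KDifference; infer_instance

-- ===== CLAIM (what is proved, stated in full; the proofs are below) =====
def Claim_equal_KDifference : Prop := ∀ (nums : List Int) (target : Int), Dom_KDifference nums target → Spec_KDifference nums target (KDifference nums target)

-- ===== LEMMAS AND PROOFS =====

-- index of the first occurrence of v in l, counting from s (proof-side description)
def firstIdx? (l : List Int) (s : Int) (v : Int) : Option Int :=
  match l with
  | [] => none
  | x :: xs => if x = v then some s else firstIdx? xs (s + 1) v

-- occurrence-index list of v in nums (what occDictB stores at key v)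
def occList (nums : List Int) (v : Int) : List Int :=
  ((PySem.List.enumerate nums).filter (fun q => q.2 == v)).map (·.1)

-- per-element contribution of A's loop body, described through firstIdx?
def phiK (nums : List Int) (t : Int) (p : Int × Int) : Int :=
  (match firstIdx? nums 0 (p.2 - t) with | some i => if i < p.1 then 1 else 0 | none => 0)
  + (match firstIdx? nums 0 (p.2 + t) with | some i => if i < p.1 then 1 else 0 | none => 0)

lemma firstIdx?_ge (l : List Int) : ∀ (s v i : Int), firstIdx? l s v = some i → s ≤ i := by
  induction l with
  | nil => intro s v i h; simp [firstIdx?] at h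
  | cons x xs ih =>
    intro s v i h
    by_cases hx : x = v
    · rw [firstIdx?, if_pos hx] at h
      injection h with h'
      omega
    · rw [firstIdx?, if_neg hx] at h
      have := ih (s + 1) v i h; omega

lemma firstIdx?_lt_iff_mem_take (l : List Int) : ∀ (s : Int) (j : Nat) (v : Int),
    (match firstIdx? l s v with | some i => i < s + j | none => False) ↔ v ∈ l.take j := by
  induction l with
  | nil => intro s j v; simp [firstIdx?]
  | cons x xs ih =>
    intro s j v
    by_cases hx : x = v
    · subst hx
      simp only [firstIdx?, if_true]
      cases j with
      | zero => simp
      | succ k => simp [List.take_succ_cons]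
    · simp only [firstIdx?, if_neg hx]
      cases j with
      | zero =>
        simp only [List.take_zero, List.not_mem_nil, iff_false]
        cases h : firstIdx? xs (s + 1) v with
        | none => simp
        | some i =>
          have := firstIdx?_ge xs (s + 1) v i h
          simp; omega
      | succ k =>
        rw [List.take_succ_cons, List.mem_cons]
        have hrec := ih (s + 1) k v
        have harith : s + (↑(k + 1) : Int) = (s + 1) + ↑k := by push_cast; ring
        rw [harith, hrec]
        have hxv : ¬ v = x := fun hh => hx hh.symm
        simp [hxv]

-- the seen-set membership test of A equals 'firstIdx < prefix length'
lemma contains_iff_firstIdx (nums pre rest : List Int) (v : Int) (h : nums = pre ++ rest) :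
    PySem.Set.contains (PySem.Set.ofList pre) v = true
    ↔ (match firstIdx? nums 0 v with | some i => i < (pre.length : Int) | none => False) := by
  rw [PySem.Set.contains_iff, PySem.Set.mem_ofList]
  have hp : pre = nums.take pre.length := by rw [h, List.take_left]
  have hiff := firstIdx?_lt_iff_mem_take nums 0 pre.length v
  simp only [zero_add] at hiff
  rw [hiff, ← hp]

-- A's loop = sum of phiK over the enumerated suffix
lemma loopA_eq (target : Int) (nums : List Int) : ∀ (rest pre : List Int) (c : Int),
    nums = pre ++ rest →
    (rest.foldl
      (fun (st : Int × PySem.Set Int) num =>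
        let c1 := if PySem.Set.contains st.2 (num - target) then st.1 + 1 else st.1
        let c2 := if PySem.Set.contains st.2 (num + target) then c1 + 1 else c1
        (c2, PySem.Set.add st.2 num))
      (c, PySem.Set.ofList pre)).1
    = c + ((PySem.List.enumerate rest (pre.length : Int)).map (phiK nums target)).sum := by
  intro rest
  induction rest with
  | nil => intro pre c _; simp [PySem.List.enumerate_nil]
  | cons num rest' ih =>
    intro pre c h
    rw [List.foldl_cons, PySem.List.enumerate_cons, List.map_cons, List.sum_cons]
    have hstep : ∀ (v : Int) (c' : Int),
        (if PySem.Set.contains (PySem.Set.ofList pre) v then c' + 1 else c')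
        = c' + (match firstIdx? nums 0 v with
                | some i => if i < (pre.length : Int) then (1:Int) else 0 | none => 0) := by
      intro v c'
      have hm := contains_iff_firstIdx nums pre (num :: rest') v h
      cases hf : firstIdx? nums 0 v with
      | none =>
        rw [hf] at hm
        have hc : PySem.Set.contains (PySem.Set.ofList pre) v = false := by
          cases hcc : PySem.Set.contains (PySem.Set.ofList pre) v with
          | false => rfl
          | true => exact (hm.mp hcc).elim
        rw [hc]; simp
      | some i =>
        rw [hf] at hm
        by_cases hi : i < (pre.length : Int)
        · rw [hm.mpr hi]; simp [hi]
        · have hc : PySem.Set.contains (PySem.Set.ofList pre) v = false := by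
            cases hcc : PySem.Set.contains (PySem.Set.ofList pre) v with
            | false => rfl
            | true => exact absurd (hm.mp hcc) hi
          rw [hc]; simp [hi]
    simp only
    rw [hstep (num - target) c, hstep (num + target)]
    have hset : PySem.Set.add (PySem.Set.ofList pre) num = PySem.Set.ofList (pre ++ [num]) :=
      (PySem.Set.ofList_append_singleton pre num).symm
    have hlen : (pre.length : Int) + 1 = (((pre ++ [num]).length : Nat) : Int) := by simp
    rw [hset, hlen, ih (pre ++ [num]) _ (by rw [h, List.append_assoc]; rfl)]
    show _ = c + (phiK nums target ((pre.length : Int), num) + _)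
    unfold phiK
    simp only
    ring


-- what occDictB stores at key v
lemma occ_getD (nums : List Int) (v : Int) :
    (occDictB nums).getD v [] = occList nums v := by
  unfold occDictB occList
  have h := PySem.Dict.getD_foldl_modify_append
      ((PySem.List.enumerate nums).map Prod.swap) PySem.Dict.empty v
  rw [List.foldl_map] at h
  simp only [Prod.fst_swap, Prod.snd_swap, List.filter_map, List.map_map,
    PySem.Dict.getD_empty, List.nil_append] at h
  exact h

lemma occ_keys (nums : List Int) : (occDictB nums).keys = PySem.Set.ofList nums := by
  unfold occDictB
  rw [PySem.Dict.keys_foldl_modify_key (PySem.List.enumerate nums) (·.2) []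
    (fun _ p => fun l => l ++ [p.1]) PySem.Dict.empty]
  rw [PySem.Dict.keys_empty, PySem.Set.update_nil_left, PySem.List.map_snd_enumerate]

lemma occ_nodup (nums : List Int) : (occDictB nums).keys.Nodup := by
  unfold occDictB
  exact PySem.Dict.nodup_keys_foldl_modify_key (PySem.List.enumerate nums) (·.2) []
    (fun _ p => fun l => l ++ [p.1]) PySem.Dict.empty PySem.Dict.nodup_keys_empty

lemma occ_contains (nums : List Int) (w : Int) :
    (occDictB nums).contains w = true ↔ w ∈ nums := by
  rw [PySem.Dict.contains_iff_mem_keys, occ_keys, PySem.Set.mem_ofList]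

lemma head_occList (v : Int) (l : List Int) : ∀ s : Int,
    (((PySem.List.enumerate l s).filter (fun q => q.2 == v)).map (·.1)).head? = firstIdx? l s v := by
  induction l with
  | nil => intro s; simp [PySem.List.enumerate_nil, firstIdx?]
  | cons x xs ih =>
    intro s
    rw [PySem.List.enumerate_cons, List.filter_cons]
    by_cases hx : x = v
    · simp [firstIdx?, hx]
    · simp [firstIdx?, hx, ih]

lemma mem_iff_firstIdx (v : Int) (l : List Int) : ∀ s : Int,
    v ∈ l ↔ (firstIdx? l s v).isSome := by
  induction l with
  | nil => intro s; simp [firstIdx?]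
  | cons x xs ih =>
    intro s
    by_cases hx : x = v
    · simp [firstIdx?, hx]
    · have : ¬ v = x := fun h => hx h.symm
      simp [firstIdx?, hx, this, ih (s + 1)]

lemma sum_map_ite_single (c : Int) (x : Int) : ∀ (K : List Int), K.Nodup → x ∈ K →
    (K.map (fun v => if x = v then c else 0)).sum = c := by
  intro K
  induction K with
  | nil => intro _ h; simp at h
  | cons k K ih =>
    intro hnd hx
    rw [List.map_cons, List.sum_cons]
    rcases List.mem_cons.mp hx with h | h
    · subst h
      have hz : (K.map (fun v => if x = v then c else 0)).sum = 0 := by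
        apply List.sum_eq_zero
        intro y hy
        rcases List.mem_map.mp hy with ⟨v, hv, rfl⟩
        have : x ≠ v := by rintro rfl; exact (List.nodup_cons.mp hnd).1 hv
        simp [this]
      simp [hz]
    · have hne : x ≠ k := by rintro rfl; exact (List.nodup_cons.mp hnd).1 h
      have : ¬ x = k := hne
      rw [if_neg this, ih (List.nodup_cons.mp hnd).2 h]
      ring

-- summing a function over a list = summing, per distinct second component, over its group
lemma sum_partition (φ : Int × Int → Int) (l : List (Int × Int)) :
    (l.map φ).sum
    = ((PySem.Set.ofList (l.map (·.2))).map
        (fun v => ((l.filter (fun q => q.2 == v)).map φ).sum)).sum := by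
  induction l using List.reverseRecOn with
  | nil => simp
  | append_singleton l p ih =>
    have hof : PySem.Set.ofList ((l ++ [p]).map (·.2))
        = (PySem.Set.ofList (l.map (·.2))).add p.2 := by
      simp [PySem.Set.ofList_append_singleton]
    rw [hof]
    have hfa : ∀ v, (((l ++ [p]).filter (fun q => q.2 == v)).map φ).sum
        = ((l.filter (fun q => q.2 == v)).map φ).sum + (if p.2 = v then φ p else 0) := by
      intro v
      rw [List.filter_append, List.map_append, List.sum_append]
      by_cases hv : p.2 = v
      · simp [hv]
      · simp [hv]
    by_cases hp : p.2 ∈ PySem.Set.ofList (l.map (·.2))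
    · rw [PySem.Set.add_of_mem hp]
      have : ((PySem.Set.ofList (l.map (·.2))).map
          (fun v => (((l ++ [p]).filter (fun q => q.2 == v)).map φ).sum)).sum
          = ((PySem.Set.ofList (l.map (·.2))).map
              (fun v => ((l.filter (fun q => q.2 == v)).map φ).sum)).sum
            + ((PySem.Set.ofList (l.map (·.2))).map (fun v => if p.2 = v then φ p else 0)).sum := by
        rw [← List.sum_map_add]
        exact congrArg List.sum (List.map_congr_left (fun v _ => hfa v))
      rw [List.map_append, List.sum_append, this,
        sum_map_ite_single (φ p) p.2 _ (PySem.Set.nodup_ofList _) hp, ← ih]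
      simp
    · rw [PySem.Set.add_of_not_mem hp, List.map_append, List.sum_append, List.map_append,
        List.sum_append]
      have h1 : ((PySem.Set.ofList (l.map (·.2))).map
          (fun v => (((l ++ [p]).filter (fun q => q.2 == v)).map φ).sum)).sum
          = ((PySem.Set.ofList (l.map (·.2))).map
              (fun v => ((l.filter (fun q => q.2 == v)).map φ).sum)).sum := by
        apply congrArg List.sum
        apply List.map_congr_left
        intro v hv
        rw [hfa v]
        have : ¬ p.2 = v := by rintro rfl; exact hp hv
        simp [this]
      have h2 : (([p.2].map (fun v => (((l ++ [p]).filter (fun q => q.2 == v)).map φ).sum)).sum)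
          = φ p := by
        have hnil : l.filter (fun q => q.2 == p.2) = [] := by
          rw [List.filter_eq_nil_iff]
          intro q hq hq2
          exact hp ((PySem.Set.mem_ofList _ _).mpr (List.mem_map.mpr ⟨q, hq, by simpa using hq2⟩))
        simp [hnil]
      rw [h1, h2, ← ih]
      simp



-- the value B reads as occ[w][0]
lemma pyGetD_occ (nums : List Int) (w f0 : Int) (h : firstIdx? nums 0 w = some f0) :
    PySem.List.pyGetD ((occDictB nums).getD w []) 0 0 = f0 := by
  rw [occ_getD]
  have hh := head_occList w nums 0
  rw [h] at hh
  have hh' : (occList nums w).head? = some f0 := hh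
  cases hl : occList nums w with
  | nil => rw [hl] at hh'; simp at hh'
  | cons x xs =>
    rw [hl] at hh'
    simp only [List.head?_cons, Option.some.injEq] at hh'
    rw [hh', PySem.List.pyGetD_zero_cons]

-- per-distinct-value contribution of B's middle loop, for one partner value w
def contribK (nums : List Int) (v w : Int) : Int :=
  match firstIdx? nums 0 w with
  | some f0 => ((occList nums v).countP (fun j => decide (f0 < j)) : Int)
  | none => 0

-- one offset step of B's middle loop adds contribK
lemma stepB_eq (nums : List Int) (v d acc : Int) :
    (if (occDictB nums).contains (v - d) then
       ((occDictB nums).getD v []).foldl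
         (fun count j =>
           if PySem.List.pyGetD ((occDictB nums).getD (v - d) []) 0 0 < j then count + 1 else count)
         acc
     else acc)
    = acc + contribK nums v (v - d) := by
  unfold contribK
  cases hf : firstIdx? nums 0 (v - d) with
  | none =>
    have hmem : (v - d) ∉ nums := by
      rw [mem_iff_firstIdx (v - d) nums 0, hf]; simp
    have hc : (occDictB nums).contains (v - d) = false := by
      cases hcc : (occDictB nums).contains (v - d) with
      | false => rfl
      | true => exact absurd ((occ_contains nums (v - d)).mp hcc) hmem
    rw [hc]; simp
  | some f0 =>
    have hmem : (v - d) ∈ nums := by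
      rw [mem_iff_firstIdx (v - d) nums 0, hf]; simp
    have hc : (occDictB nums).contains (v - d) = true := (occ_contains nums (v - d)).mpr hmem
    have hpg : PySem.List.pyGetD (occList nums (v - d)) 0 0 = f0 := by
      rw [← occ_getD]; exact pyGetD_occ nums (v - d) f0 hf
    simp only [hc, if_true, occ_getD, hpg]
    exact PySem.List.foldl_ite_add_one (fun j => f0 < j) (occList nums v) acc

-- B = sum of per-value contributions over the distinct values
lemma altB_eq (nums : List Int) (target : Int) :
    KDifference_alt nums target
    = ((PySem.Set.ofList nums).map
        (fun v => contribK nums v (v - target) + contribK nums v (v + target))).sum := by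
  have h0 : KDifference_alt nums target
      = (occDictB nums).items.foldl
          (fun count p =>
            [target, -target].foldl
              (fun count d =>
                if (occDictB nums).contains (p.1 - d) then
                  p.2.foldl
                    (fun count j =>
                      if PySem.List.pyGetD ((occDictB nums).getD (p.1 - d) []) 0 0 < j
                      then count + 1 else count)
                    count
                else count)
              count)
          0 := rfl
  rw [h0, PySem.Dict.items_eq_map_keys (occDictB nums) (occ_nodup nums) [], List.foldl_map,
    occ_keys]
  rw [PySem.List.foldl_congr_mem _ _
    (fun acc v => acc + (contribK nums v (v - target) + contribK nums v (v + target))) 0 ?_]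
  · rw [PySem.List.foldl_add]
    simp
  · intro acc v _
    simp only [List.foldl_cons, List.foldl_nil]
    rw [stepB_eq nums v target acc, stepB_eq nums v (-target)]
    have hvt : v - -target = v + target := by ring
    rw [hvt]
    ring

-- each group's phiK-sum is that value's contribution
lemma group_eq (nums : List Int) (target v : Int) :
    (((PySem.List.enumerate nums 0).filter (fun q => q.2 == v)).map (phiK nums target)).sum
    = contribK nums v (v - target) + contribK nums v (v + target) := by
  have hmap : ((PySem.List.enumerate nums 0).filter (fun q => q.2 == v)).map (phiK nums target)
      = (occList nums v).map (fun j =>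
          (match firstIdx? nums 0 (v - target) with
           | some i => if i < j then (1:Int) else 0 | none => 0)
        + (match firstIdx? nums 0 (v + target) with
           | some i => if i < j then (1:Int) else 0 | none => 0)) := by
    rw [occList, List.map_map]
    apply List.map_congr_left
    intro q hq
    have hq2 : q.2 = v := by simpa using (List.mem_filter.mp hq).2
    simp only [Function.comp, phiK, hq2]
  rw [hmap, List.sum_map_add]
  have hcnt : ∀ f0 : Int,
      ((occList nums v).map (fun j => if f0 < j then (1:Int) else 0)).sum
      = ((occList nums v).countP (fun j => decide (f0 < j)) : Int) := by
    intro f0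
    rw [← PySem.List.sum_map_ite_one_zero (fun j => decide (f0 < j)) (occList nums v)]
    apply congrArg
    apply List.map_congr_left
    intro j _
    by_cases h : f0 < j <;> simp [h]
  have hside : ∀ w : Int,
      ((occList nums v).map (fun j =>
        (match firstIdx? nums 0 w with
         | some i => if i < j then (1:Int) else 0 | none => 0))).sum
      = contribK nums v w := by
    intro w
    unfold contribK
    cases hf : firstIdx? nums 0 w with
    | none => simp
    | some f0 => simpa using hcnt f0
  rw [hside (v - target), hside (v + target)]

-- ===== VERDICT (by name: the statement is the Claim_ definition above) =====
theorem KDifference_spec : Claim_equal_KDifference := by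
  intro nums target _
  show KDifference nums target = KDifference_alt nums target
  have hA : KDifference nums target
      = ((PySem.List.enumerate nums 0).map (phiK nums target)).sum := by
    unfold KDifference
    simpa using loopA_eq target nums nums [] 0 rfl
  rw [hA, sum_partition (phiK nums target) (PySem.List.enumerate nums 0)]
  rw [PySem.List.map_snd_enumerate nums 0, altB_eq]
  exact congrArg List.sum (List.map_congr_left (fun v _ => group_eq nums target v))
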